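-- pv_equiv track=rewrite | github.com/selvamani1992/Python_codings | three_four_sequence.py | nth_threefour
-- ===== SOURCE A (Python) =====
-- def nth_threefour(n):
--   lst = []
--   for i in range(n):
--     if i == 0:
--       lst.append(3)
--     else:
--       lastchar = list(str(lst[i-1]))
--       size = len(lastchar)
--       x = 0
--       while size >= 0:
--         if size == 0:
--           lastchar = '3'+''.join(lastchar)
--           lst.append(int(lastchar))
--         elif int(lastchar[-1-x]) == 3:
--           lastchar[-1-x] = '4'
--           lst.append(int(''.join(lastchar)))
--           x += 1
--           break
--         else:
--           lastchar[-1-x] = '3'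
--           x += 1
--         size -= 1
--   return(lst)
-- ===== SOURCE B (Python) =====
-- def nth_threefour(n):
--     def term(m):
--         # decimal number whose digits spell m's binary expansion below the leading bit (0 -> 3, 1 -> 4)
--         return 0 if m < 2 else term(m // 2) * 10 + 3 + m % 2
--     return [term(i + 2) for i in range(n)]
-- ===== Notes on version B (the rewrite author's own statement) =====
-- stated objective: alternative
-- what changed: A builds each term by incrementing the previous term's digit string with a hand-written right-to-left carry loop over str(lst[i-1]); B drops the dependence on the previous term entirely and computes each term independently from its index: the term is the decimal number whose digits (three for a zero bit, four for a one bit) spell the binary expansion of the index offset by two below its leading bit, computed by pure integer recursion with no strings at all.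
import Mathlib
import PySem

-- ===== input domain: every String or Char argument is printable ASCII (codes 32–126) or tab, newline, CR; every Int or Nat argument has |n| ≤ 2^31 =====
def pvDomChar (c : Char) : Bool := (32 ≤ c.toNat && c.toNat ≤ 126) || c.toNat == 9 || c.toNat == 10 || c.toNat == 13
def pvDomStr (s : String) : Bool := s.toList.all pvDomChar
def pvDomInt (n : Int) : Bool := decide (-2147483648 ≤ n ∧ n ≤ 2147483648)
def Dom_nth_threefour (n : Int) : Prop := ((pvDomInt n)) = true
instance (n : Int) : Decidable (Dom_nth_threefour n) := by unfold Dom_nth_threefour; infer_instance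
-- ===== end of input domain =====

-- B replaces A's carry-increment of the previous term's digit string by a closed-form
-- per-index computation (pure integer recursion on the binary expansion of the index, no
-- strings); objective: alternative algorithm, same return values.

-- ===== PORT A =====
-- A's inner `while size >= 0` loop: scans the digit list from the right (Python index -1-x),
-- returns the single value A appends in this iteration.  `int(c)` is ofChars? [c]; the .getD
-- defaults are unreachable (A only ever reaches in-range indices and digit characters).
def pvWhileA (lastchar : List Char) (size : Int) (x : Nat) : Int :=
  if _h : 0 ≤ size then
    if size = 0 then
      -- lastchar = '3'+''.join(lastchar); lst.append(int(lastchar))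
      (PySem.Int.ofChars? ('3' :: lastchar)).getD 0
    else if (PySem.Int.ofChars? [PySem.List.pyGetD lastchar (-1 - (x : Int)) ' ']).getD 0 = 3 then
      -- lastchar[-1-x] = '4'; lst.append(int(''.join(lastchar))); break
      (PySem.Int.ofChars? (PySem.List.pySetD lastchar (-1 - (x : Int)) '4')).getD 0
    else
      -- lastchar[-1-x] = '3'; x += 1; size -= 1
      pvWhileA (PySem.List.pySetD lastchar (-1 - (x : Int)) '3') (size - 1) (x + 1)
  else 0   -- loop exits without appending: unreachable from A's entry state (size = len ≥ 1)
termination_by size.toNat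
decreasing_by omega

def nth_threefour (n : Int) : List Int :=
  (PySem.List.pyRange 0 n 1).foldl
    (fun lst i =>
      if i = 0 then lst ++ [3]
      else
        let lastchar := PySem.Int.toChars (PySem.List.pyGetD lst (i - 1) 0)
        lst ++ [pvWhileA lastchar (PySem.List.len lastchar) 0])
    []

-- ===== PORT B =====
-- Source B's helper `term`: 0 if m < 2 else term(m // 2) * 10 + 3 + m % 2
def pvTerm (m : Int) : Int :=
  if m < 2 then 0
  else pvTerm (PySem.Int.floordiv m 2) * 10 + 3 + PySem.Int.mod m 2
termination_by m.toNat
decreasing_by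
  rename_i h
  rw [PySem.Int.floordiv_eq_ediv_of_pos (by norm_num)]
  omega

def nth_threefour_alt (n : Int) : List Int :=
  (PySem.List.pyRange 0 n 1).map (fun i => pvTerm (i + 2))

-- ===== PRECONDITION & SPEC =====
def Spec_nth_threefour (n : Int) (out : List Int) : Prop := out = nth_threefour_alt n
instance (n : Int) (out : List Int) : Decidable (Spec_nth_threefour n out) := by unfold Spec_nth_threefour; infer_instance

-- ===== CLAIM (what is proved, stated in full; the proofs are below) =====
def Claim_equal_nth_threefour : Prop := ∀ (n : Int), Dom_nth_threefour n → Spec_nth_threefour n (nth_threefour n)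

-- ===== LEMMAS AND PROOFS =====

-- ---- generic character facts ----

lemma pv_char_eq (c d : Char) (h : c.toNat = d.toNat) : c = d := Char.ext (UInt32.toNat_inj.mp h)

-- a digit character is one of the ten digit literals
lemma pv_digit_cases (c : Char) (h : c.isDigit = true) :
    c = '0' ∨ c = '1' ∨ c = '2' ∨ c = '3' ∨ c = '4' ∨ c = '5' ∨ c = '6' ∨ c = '7' ∨ c = '8' ∨ c = '9' := by
  simp [Char.isDigit, UInt32.le_iff_toNat_le] at h
  have h10 : c.toNat = 48 ∨ c.toNat = 49 ∨ c.toNat = 50 ∨ c.toNat = 51 ∨ c.toNat = 52 ∨ c.toNat = 53 ∨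
      c.toNat = 54 ∨ c.toNat = 55 ∨ c.toNat = 56 ∨ c.toNat = 57 := by
    obtain ⟨h1, h2⟩ := h; omega
  rcases h10 with h'|h'|h'|h'|h'|h'|h'|h'|h'|h' <;>
    [have := pv_char_eq c '0' (by rw [h']; rfl); have := pv_char_eq c '1' (by rw [h']; rfl);
     have := pv_char_eq c '2' (by rw [h']; rfl); have := pv_char_eq c '3' (by rw [h']; rfl);
     have := pv_char_eq c '4' (by rw [h']; rfl); have := pv_char_eq c '5' (by rw [h']; rfl);
     have := pv_char_eq c '6' (by rw [h']; rfl); have := pv_char_eq c '7' (by rw [h']; rfl);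
     have := pv_char_eq c '8' (by rw [h']; rfl); have := pv_char_eq c '9' (by rw [h']; rfl)] <;> tauto

lemma pv_digit_not_space (c : Char) (h : c.isDigit = true) : PySem.Int.isIntSpace c = false := by
  rcases pv_digit_cases c h with h'|h'|h'|h'|h'|h'|h'|h'|h'|h' <;> subst h' <;> decide

lemma pv_dropWhile_head (p : Char → Bool) (L : List Char) (h : ∀ c ∈ L.head?, p c = false) :
    List.dropWhile p L = L := by
  cases L with
  | nil => rfl
  | cons c t => simp [h c (by simp)]

-- int()'s whitespace strip is the identity on a nonempty all-digit list
lemma pv_clean_digits (L : List Char) (_hne : L ≠ []) (hd : ∀ c ∈ L, c.isDigit = true) :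
    (List.dropWhile PySem.Int.isIntSpace (List.dropWhile PySem.Int.isIntSpace L).reverse).reverse = L := by
  rw [pv_dropWhile_head _ L (by
    intro c hc
    exact pv_digit_not_space c (hd c (List.mem_of_mem_head? hc)))]
  rw [pv_dropWhile_head _ L.reverse (by
    intro c hc
    exact pv_digit_not_space c (hd c (List.mem_reverse.mp (List.mem_of_mem_head? hc))))]
  exact List.reverse_reverse L

-- ---- int(): characterising PySem's (private) digit parser through its public wrapper ----

def pvDigitsWith (g : List Char → Bool → Nat → Option Nat) (x : List Char) : Option Nat :=
  match x with
  | [] => none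
  | cs => g cs false 0

def pvOfCharsWith (g : List Char → Bool → Nat → Option Nat) (s : List Char) : Option Int :=
  have cs := (List.dropWhile PySem.Int.isIntSpace (List.dropWhile PySem.Int.isIntSpace s).reverse).reverse
  match cs with
  | '-' :: ds => Option.map (fun n => -n) (do let a ← pvDigitsWith g ds; pure ((a : Int)))
  | '+' :: ds => Option.map (fun n => n) (do let a ← pvDigitsWith g ds; pure ((a : Int)))
  | ds => Option.map (fun n => n) (do let a ← pvDigitsWith g ds; pure ((a : Int)))

-- PySem.Int.ofChars? is pvOfCharsWith applied to a digit-run parser with these two equations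
theorem pv_exists_go : ∃ g : List Char → Bool → Nat → Option Nat,
    (∀ L, PySem.Int.ofChars? L = pvOfCharsWith g L) ∧
    (∀ b a, g [] b a = if b = true then some a else none) ∧
    (∀ c rest b a, g (c :: rest) b a =
      if c.isDigit = true then g rest true (a * 10 + (c.toNat - '0'.toNat))
      else
        if c = '_' ∧ b = true then
          match rest with
          | d :: _ => if d.isDigit = true then g rest false a else none
          | [] => none
        else none) :=
  ⟨_, fun _ => rfl, fun _ _ => rfl, fun _ _ _ _ => rfl⟩

def pvVal (L : List Char) : Nat := L.foldl (fun a c => a * 10 + (c.toNat - '0'.toNat)) 0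

lemma pv_g_true (g : List Char → Bool → Nat → Option Nat)
    (h0 : ∀ b a, g [] b a = if b = true then some a else none)
    (h1 : ∀ c rest b a, g (c :: rest) b a =
      if c.isDigit = true then g rest true (a * 10 + (c.toNat - '0'.toNat))
      else
        if c = '_' ∧ b = true then
          match rest with
          | d :: _ => if d.isDigit = true then g rest false a else none
          | [] => none
        else none) :
    ∀ (L : List Char), (∀ c ∈ L, c.isDigit = true) → ∀ a,
      g L true a = some (L.foldl (fun x c => x * 10 + (c.toNat - '0'.toNat)) a) := by
  intro L
  induction L with
  | nil => intro _ a; rw [h0]; simp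
  | cons c rest ih =>
    intro hd a
    rw [h1, if_pos (hd c (by simp))]
    rw [ih (fun d hdm => hd d (by simp [hdm]))]
    simp [List.foldl_cons]

-- int() of a nonempty all-digit string is its decimal value
lemma pv_parse (L : List Char) (hne : L ≠ []) (hd : ∀ c ∈ L, c.isDigit = true) :
    PySem.Int.ofChars? L = some ((pvVal L : Nat) : Int) := by
  obtain ⟨g, hof, h0, h1⟩ := pv_exists_go
  rw [hof]
  unfold pvOfCharsWith
  simp only []
  rw [pv_clean_digits L hne hd]
  obtain ⟨c, rest, rfl⟩ : ∃ c rest, L = c :: rest := by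
    cases L with | nil => exact absurd rfl hne | cons a b => exact ⟨a, b, rfl⟩
  have hc : c.isDigit = true := hd c (by simp)
  split
  · rename_i ds hds
    rw [List.cons.injEq] at hds
    rw [hds.1] at hc
    simp at hc
  · rename_i ds hds
    rw [List.cons.injEq] at hds
    rw [hds.1] at hc
    simp at hc
  · simp only [pvDigitsWith]
    rw [h1, if_pos hc]
    rw [pv_g_true g h0 h1 rest (fun d hdm => hd d (by simp [hdm]))]
    simp [pvVal, List.foldl_cons]

-- ---- the 3/4-digit string of index m (bits of m below the leading one, 0→'3', 1→'4') ----

def pvD (m : Nat) : List Char :=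
  (Nat.toDigits 2 m).tail.map (fun c => if c = '1' then '4' else '3')

lemma pv_pvD_rec (m : Nat) (hm : 2 ≤ m) :
    pvD m = pvD (m / 2) ++ [if m % 2 = 1 then '4' else '3'] := by
  unfold pvD
  rw [Nat.toDigits_of_base_le (by norm_num) hm]
  have hne : Nat.toDigits 2 (m / 2) ≠ [] := by
    have := Nat.length_toDigits_pos (b := 2) (n := m / 2)
    intro h; rw [h] at this; simp at this
  obtain ⟨h, t, hht⟩ : ∃ h t, Nat.toDigits 2 (m / 2) = h :: t := by
    cases hh : Nat.toDigits 2 (m / 2) with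
    | nil => exact absurd hh hne
    | cons a b => exact ⟨a, b, rfl⟩
  rw [hht]
  simp only [List.cons_append, List.tail_cons, List.map_append, List.map_cons, List.map_nil]
  congr 1
  rcases Nat.mod_two_eq_zero_or_one m with h2 | h2 <;> rw [h2] <;> decide

lemma pv_pvD_one : pvD 1 = [] := by decide

lemma pv_pvD_ne_nil (m : Nat) (hm : 2 ≤ m) : pvD m ≠ [] := by
  rw [pv_pvD_rec m hm]; simp

lemma pv_pvD_digits (m : Nat) : ∀ c ∈ pvD m, c.isDigit = true := by
  intro c hc
  unfold pvD at hc
  obtain ⟨d, _, rfl⟩ := List.mem_map.mp hc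
  split <;> decide

-- ---- the binary increment on a reversed digit list, and its action on pvD ----

def pvIncR : List Char → List Char
  | [] => ['3']
  | c :: r => if c = '3' then '4' :: r else '3' :: pvIncR r

lemma pv_inc_pvD (m : Nat) (hm : 1 ≤ m) : (pvIncR (pvD m).reverse).reverse = pvD (m + 1) := by
  induction m using Nat.strong_induction_on with
  | _ m ih =>
    by_cases h1 : m = 1
    · subst h1
      rw [pv_pvD_one]
      rw [pv_pvD_rec 2 (by norm_num)]
      norm_num [pv_pvD_one, pvIncR]
    · have hm2 : 2 ≤ m := by omega
      rcases Nat.mod_two_eq_zero_or_one m with hpar | hpar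
      · -- even m: last mapped bit is '3'; flip it to '4'
        rw [pv_pvD_rec m hm2, hpar]
        simp only [if_neg (by norm_num : ¬ (0 = 1))]
        rw [List.reverse_append]
        simp only [List.reverse_cons, List.reverse_nil, List.nil_append, List.cons_append]
        rw [pvIncR, if_pos rfl]
        rw [pv_pvD_rec (m + 1) (by omega)]
        have e1 : (m + 1) / 2 = m / 2 := by omega
        have e2 : (m + 1) % 2 = 1 := by omega
        rw [e1, e2]
        simp
      · -- odd m: last mapped bit is '4'; it becomes '3' and the carry moves left
        rw [pv_pvD_rec m hm2, hpar]
        rw [List.reverse_append]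
        simp only [List.reverse_cons, List.reverse_nil, List.nil_append, List.cons_append]
        rw [pvIncR, if_neg (by decide)]
        rw [List.reverse_cons]
        rw [ih (m / 2) (by omega) (by omega)]
        rw [pv_pvD_rec (m + 1) (by omega)]
        have e1 : (m + 1) / 2 = m / 2 + 1 := by omega
        have e2 : (m + 1) % 2 = 0 := by omega
        rw [e1, e2]
        simp

-- ---- values and decimal digits of pvD ----

lemma pv_val_append (X : List Char) (c : Char) :
    pvVal (X ++ [c]) = pvVal X * 10 + (c.toNat - '0'.toNat) := by
  unfold pvVal
  rw [List.foldl_append]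
  simp

lemma pv_val_ge3 (m : Nat) (hm : 2 ≤ m) : 3 ≤ pvVal (pvD m) := by
  rw [pv_pvD_rec m hm, pv_val_append]
  rcases Nat.mod_two_eq_zero_or_one m with h2 | h2 <;> rw [h2] <;> simp

lemma pv_toDigits_val (m : Nat) (hm : 2 ≤ m) : Nat.toDigits 10 (pvVal (pvD m)) = pvD m := by
  induction m using Nat.strong_induction_on with
  | _ m ih =>
    by_cases hsmall : m < 4
    · interval_cases m <;> decide
    · have hm2 : 2 ≤ m / 2 := by omega
      rw [pv_pvD_rec m hm, pv_val_append]
      set c : Char := if m % 2 = 1 then '4' else '3' with hc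
      have hd10 : c.toNat - '0'.toNat < 10 := by
        rcases Nat.mod_two_eq_zero_or_one m with h2 | h2 <;> simp [hc, h2]
      have hpos : 0 < pvVal (pvD (m / 2)) := by
        have := pv_val_ge3 (m / 2) hm2; omega
      have := Nat.toDigits_append_toDigits (b := 10) (n := pvVal (pvD (m / 2)))
        (d := c.toNat - '0'.toNat) (by norm_num) hpos hd10
      rw [show pvVal (pvD (m / 2)) * 10 + (c.toNat - '0'.toNat)
            = 10 * pvVal (pvD (m / 2)) + (c.toNat - '0'.toNat) by ring]
      rw [← this]
      rw [Nat.toDigits_of_lt_base hd10]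
      rw [ih (m / 2) (by omega) hm2]
      congr 1
      rcases Nat.mod_two_eq_zero_or_one m with h2 | h2
      · simp only [hc, h2]
        norm_num
        decide
      · simp only [hc, h2]
        norm_num
        decide

lemma pv_toChars_val (m : Nat) (hm : 2 ≤ m) :
    PySem.Int.toChars ((pvVal (pvD m) : Nat) : Int) = pvD m := by
  unfold PySem.Int.toChars
  rw [if_neg (not_lt.mpr (Int.natCast_nonneg _))]
  rw [Int.toNat_natCast]
  exact pv_toDigits_val m hm

-- ---- B's term equals the decimal value of pvD ----

lemma pv_term_nat (k : Nat) : pvTerm (k : Int) = ((pvVal (pvD k) : Nat) : Int) := by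
  induction k using Nat.strong_induction_on with
  | _ k ih =>
    rw [pvTerm]
    by_cases hk : k < 2
    · rw [if_pos (by exact_mod_cast hk)]
      interval_cases k <;> decide
    · rw [if_neg (by omega)]
      have h2 : ((2 : Int)) = ((2 : Nat) : Int) := by norm_num
      rw [h2, PySem.Int.floordiv_natCast, PySem.Int.mod_natCast]
      rw [ih (k / 2) (by omega)]
      rw [pv_pvD_rec k (by omega), pv_val_append]
      rcases Nat.mod_two_eq_zero_or_one k with hp | hp
      · rw [hp]; norm_num; rw [show '3'.toNat - '0'.toNat = 3 from rfl]; norm_num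
      · rw [hp]; norm_num; rw [show '4'.toNat - '0'.toNat = 4 from rfl]; push_cast; ring

-- ---- A's while loop: Python indexing and the carry walk ----

lemma pv_getD_neg (C : List Char) (c : Char) (x : Nat) (d : Char) :
    PySem.List.pyGetD (C ++ c :: List.replicate x '3') (-1 - (x : Int)) d = c := by
  have h1 : (-1 - (x : Int)) = -(((x+1 : Nat)) : Int) := by push_cast; ring
  rw [h1, PySem.List.pyGetD_neg_natCast _ _ _ (by omega) (by simp)]
  rw [List.getElem_append_right (by simp)]
  simp

lemma pv_setD_neg (C : List Char) (c : Char) (x : Nat) (v : Char) :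
    PySem.List.pySetD (C ++ c :: List.replicate x '3') (-1 - (x : Int)) v = C ++ v :: List.replicate x '3' := by
  simp only [PySem.List.pySetD, PySem.List.pySet?, PySem.List.pyIdx?]
  have hlen : (C ++ c :: List.replicate x '3').length = C.length + 1 + x := by
    rw [List.length_append, List.length_cons, List.length_replicate]; omega
  rw [if_neg (by omega), if_pos (by rw [hlen]; push_cast; omega)]
  simp only [Option.map_some, Option.getD_some]
  have hidx : (C ++ c :: List.replicate x '3').length - (-(-1 - (x:Int))).toNat = C.length := by
    rw [hlen]; omega
  rw [hidx]
  rw [List.set_append_right _ _ (le_refl _)]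
  simp

-- int() of one digit character equals 3 exactly for '3'
lemma pv_parse_single (c : Char) (h : c.isDigit = true) :
    ((PySem.Int.ofChars? [c]).getD 0 = 3) ↔ c = '3' := by
  rcases pv_digit_cases c h with h'|h'|h'|h'|h'|h'|h'|h'|h'|h' <;> subst h' <;> decide

-- A's while loop computes int() of the binary-incremented digit list
lemma pv_whileA_spec (C : List Char) (hd : ∀ c ∈ C, c.isDigit = true) : ∀ (x : Nat),
    pvWhileA (C ++ List.replicate x '3') (C.length : Int) x =
      (PySem.Int.ofChars? ((pvIncR C.reverse).reverse ++ List.replicate x '3')).getD 0 := by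
  induction C using List.reverseRecOn with
  | nil =>
    intro x
    rw [pvWhileA]
    simp [pvIncR]
  | append_singleton C' c ih =>
    intro x
    rw [pvWhileA]
    rw [dif_pos (by simp; omega), if_neg (by simp; omega)]
    have hassoc : (C' ++ [c]) ++ List.replicate x '3' = C' ++ c :: List.replicate x '3' := by simp
    rw [hassoc, pv_getD_neg]
    have hcd : c.isDigit = true := hd c (by simp)
    by_cases hc3 : c = '3'
    · rw [if_pos ((pv_parse_single c hcd).mpr hc3), pv_setD_neg]
      subst hc3
      rw [List.reverse_append, List.reverse_singleton]
      rw [show ['3'] ++ C'.reverse = '3' :: C'.reverse from rfl]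
      rw [pvIncR, if_pos rfl]
      simp
    · rw [if_neg (by rw [pv_parse_single c hcd]; exact hc3), pv_setD_neg]
      have hlen : ((C' ++ [c]).length : Int) - 1 = (C'.length : Int) := by simp
      have hrep : C' ++ '3' :: List.replicate x '3' = C' ++ List.replicate (x+1) '3' := by
        simp [List.replicate_succ]
      rw [hrep, hlen, ih (fun d hdm => hd d (by simp [hdm])) (x+1)]
      have hinc : pvIncR ([c] ++ C'.reverse) = '3' :: pvIncR C'.reverse := by
        rw [show [c] ++ C'.reverse = c :: C'.reverse from rfl, pvIncR, if_neg hc3]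
      rw [List.reverse_append, List.reverse_singleton, hinc]
      simp [List.replicate_succ]

-- A's per-iteration appended value, on the digit string of index m, is B's next term
lemma pv_step_term (m : Nat) (hm : 2 ≤ m) :
    pvWhileA (pvD m) (((pvD m).length : Nat) : Int) 0 = ((pvVal (pvD (m + 1)) : Nat) : Int) := by
  have h := pv_whileA_spec (pvD m) (pv_pvD_digits m) 0
  simp only [List.replicate, List.append_nil] at h
  rw [h]
  rw [pv_inc_pvD m (by omega)]
  rw [pv_parse (pvD (m + 1)) (pv_pvD_ne_nil (m + 1) (by omega)) (pv_pvD_digits (m + 1))]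
  rfl

-- ---- the main fold ----

lemma pv_fold_eq (N : Nat) :
    ((List.range N).map (fun k => ((0 : Int) + (k : Nat)))).foldl
      (fun lst i =>
        if i = 0 then lst ++ [3]
        else
          let lastchar := PySem.Int.toChars (PySem.List.pyGetD lst (i - 1) 0)
          lst ++ [pvWhileA lastchar (PySem.List.len lastchar) 0]) []
    = (List.range N).map (fun k => ((pvVal (pvD (k + 2)) : Nat) : Int)) := by
  induction N with
  | zero => simp
  | succ N ih =>
    rw [List.range_succ, List.map_append, List.foldl_append, ih, List.map_append]
    simp only [List.map_cons, List.map_nil, List.foldl_cons, List.foldl_nil]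
    by_cases hN : N = 0
    · subst hN
      norm_num
      decide
    · rw [if_neg (by omega)]
      have hidx : (0 : Int) + (N : Nat) - 1 = (((N - 1 : Nat)) : Int) := by omega
      rw [hidx]
      rw [PySem.List.pyGetD_natCast]
      have hlt : N - 1 < ((List.range N).map (fun k => ((pvVal (pvD (k + 2)) : Nat) : Int))).length := by
        simp; omega
      rw [List.getD_eq_getElem _ _ hlt]
      rw [List.getElem_map, List.getElem_range]
      have hsub : N - 1 + 2 = N + 1 := by omega
      rw [hsub]
      rw [pv_toChars_val (N + 1) (by omega)]
      rw [show PySem.List.len (pvD (N + 1)) = (((pvD (N + 1)).length : Nat) : Int) from by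
        simp [PySem.List.len]]
      rw [pv_step_term (N + 1) (by omega)]

-- B's map over the same range, rewritten through pvTerm
lemma pv_alt_eq (N : Nat) :
    ((List.range N).map (fun k => ((0 : Int) + (k : Nat)))).map (fun i => pvTerm (i + 2))
    = (List.range N).map (fun k => ((pvVal (pvD (k + 2)) : Nat) : Int)) := by
  rw [List.map_map]
  apply List.map_congr_left
  intro k _
  show pvTerm ((0 : Int) + (k : Nat) + 2) = _
  have : (0 : Int) + (k : Nat) + 2 = (((k + 2 : Nat)) : Int) := by push_cast; ring
  rw [this, pv_term_nat]

-- ===== VERDICT (by name: the statement is the Claim_ definition above) =====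
theorem nth_threefour_spec : Claim_equal_nth_threefour := by
  intro n _
  unfold Spec_nth_threefour nth_threefour nth_threefour_alt
  rw [PySem.List.pyRange_one]
  rw [show n - 0 = n from by ring]
  rw [pv_fold_eq n.toNat, ← pv_alt_eq n.toNat]
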